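-- pv_equiv track=rewrite | github.com/abiugu/PROJETOS | PROJETO PADROES BLAZE/codigo para formatar historico.py | contar_ciclos
-- ===== SOURCE A (Python) =====
-- def contar_ciclos(cores, cor_alvo):
--     ciclos = 0
--     anterior = None
--     for cor in cores:
--         if cor == 0:
--             continue
--         if cor == cor_alvo and anterior != cor_alvo:
--             ciclos += 1
--         anterior = cor
--     return ciclos
-- ===== SOURCE B (Python) =====
-- def contar_ciclos(cores, cor_alvo):
--     f = [c for c in cores if c != 0]
--     return f.count(cor_alvo) - sum(1 for a, b in zip(f, f[1:]) if a == cor_alvo and b == cor_alvo)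
-- ===== Notes on version B (the rewrite author's own statement) =====
-- stated objective: alternative
-- what changed: Replaced the anterior/ciclos state machine with the arithmetic identity runs = occurrences minus adjacent equal pairs: on the zero-filtered list, count occurrences of cor_alvo and subtract the number of adjacent cor_alvo/cor_alvo pairs; no run detection or previous-element state is kept.
import Mathlib
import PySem

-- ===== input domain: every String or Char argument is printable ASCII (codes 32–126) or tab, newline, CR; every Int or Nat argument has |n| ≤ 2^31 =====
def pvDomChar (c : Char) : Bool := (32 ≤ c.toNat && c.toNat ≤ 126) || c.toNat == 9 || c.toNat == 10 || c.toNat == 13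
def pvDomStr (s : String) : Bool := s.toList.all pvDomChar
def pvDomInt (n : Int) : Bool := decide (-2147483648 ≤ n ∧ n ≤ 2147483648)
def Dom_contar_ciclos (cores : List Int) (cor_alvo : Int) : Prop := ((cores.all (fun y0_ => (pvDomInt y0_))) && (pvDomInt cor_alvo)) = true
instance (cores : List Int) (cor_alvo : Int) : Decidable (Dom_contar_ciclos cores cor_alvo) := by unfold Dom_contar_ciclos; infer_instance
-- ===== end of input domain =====

-- B replaces A's anterior/ciclos state machine by the arithmetic identity runs = occurrences - adjacent equal pairs on the zero-filtered list (objective: alternative; same O(n) cost).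


-- ===== PORT A =====
-- A's for-loop with the (ciclos, anterior) state, 'continue' on zero, as a foldl.
def contar_ciclos (cores : List Int) (cor_alvo : Int) : Int :=
  (cores.foldl
    (fun (s : Int × Option Int) cor =>
      if cor = 0 then s
      else ((if cor = cor_alvo ∧ s.2 ≠ some cor_alvo then s.1 + 1 else s.1), some cor))
    (0, none)).1

-- ===== PORT B =====
-- Source B: filter zeros, then count(cor_alvo) minus the number of adjacent (cor_alvo, cor_alvo) pairs in zip(f, f[1:]).
def contar_ciclos_alt (cores : List Int) (cor_alvo : Int) : Int :=
  let f := cores.filter (fun c => c != 0)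
  (f.count cor_alvo : Int)
    - (((f.zip (f.drop 1)).filter (fun p => p.1 == cor_alvo && p.2 == cor_alvo)).length : Int)

-- ===== PRECONDITION & SPEC =====
def Spec_contar_ciclos (cores : List Int) (cor_alvo : Int) (out : Int) : Prop := out = contar_ciclos_alt cores cor_alvo
instance (cores : List Int) (cor_alvo : Int) (out : Int) : Decidable (Spec_contar_ciclos cores cor_alvo out) := by unfold Spec_contar_ciclos; infer_instance

-- ===== CLAIM (what is proved, stated in full; the proofs are below) =====
def Claim_equal_contar_ciclos : Prop := ∀ (cores : List Int) (cor_alvo : Int), Dom_contar_ciclos cores cor_alvo → Spec_contar_ciclos cores cor_alvo (contar_ciclos cores cor_alvo)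

-- ===== LEMMAS AND PROOFS =====

-- A's loop step, named for the proofs.
def pvStep (cor_alvo : Int) (s : Int × Option Int) (cor : Int) : Int × Option Int :=
  if cor = 0 then s
  else ((if cor = cor_alvo ∧ s.2 ≠ some cor_alvo then s.1 + 1 else s.1), some cor)

-- Adjacent (t,t) pairs in p :: l, recursively (proof-side bridge between the two ports).
def pvAdj (t : Int) (p : Option Int) : List Int → Int
  | [] => 0
  | x :: xs => (if p = some t ∧ x = t then 1 else 0) + pvAdj t (some x) xs

theorem pvStep_zero_skip (cor_alvo : Int) (cores : List Int) (s : Int × Option Int) :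
    cores.foldl (pvStep cor_alvo) s = (cores.filter (fun c => c != 0)).foldl (pvStep cor_alvo) s := by
  induction cores generalizing s with
  | nil => rfl
  | cons x xs ih =>
    by_cases hx : x = 0
    · subst hx; simp [pvStep, ih]
    · simp [hx, List.foldl_cons, ih]

theorem pvFoldl_count_adj (t : Int) (l : List Int) (h : ∀ x ∈ l, ¬ x = 0) :
    ∀ (c : Int) (p : Option Int),
      (l.foldl (pvStep t) (c, p)).1 = c + (l.count t : Int) - pvAdj t p l := by
  induction l with
  | nil => intro c p; simp [pvAdj]
  | cons x xs ih =>
    intro c p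
    have hx : ¬ x = 0 := h x List.mem_cons_self
    have hxs : ∀ y ∈ xs, ¬ y = 0 := fun y hy => h y (List.mem_cons_of_mem _ hy)
    rw [List.foldl_cons]
    have hstep : pvStep t (c, p) x
        = ((if x = t ∧ p ≠ some t then c + 1 else c), some x) := by
      simp [pvStep, hx]
    rw [hstep, ih hxs]
    by_cases hxt : x = t
    · subst hxt
      by_cases hp : p = some x
      · simp [hp, pvAdj]; ring
      · simp [hp, pvAdj]; ring
    · have hcount : (x :: xs).count t = xs.count t := by
        simp [hxt]
      simp [pvAdj, hxt, hcount]

theorem pvAdj_eq_zip (t : Int) (xs : List Int) :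
    ∀ (x : Int),
      pvAdj t (some x) xs
        = ((((x :: xs).zip xs).filter (fun p => p.1 == t && p.2 == t)).length : Int) := by
  induction xs with
  | nil => intro x; simp [pvAdj]
  | cons y ys ih =>
    intro x
    have hz : ((x :: y :: ys).zip (y :: ys)) = (x, y) :: ((y :: ys).zip ys) := by
      simp [List.zip]
    rw [hz]
    by_cases hx : x = t
    · by_cases hy : y = t
      · simp [pvAdj, hx, hy, ih]
        ring
      · simp [pvAdj, hx, hy, ih y]
    · simp [pvAdj, hx, ih y]

-- ===== VERDICT (by name: the statement is the Claim_ definition above) =====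
theorem contar_ciclos_spec : Claim_equal_contar_ciclos := by
  intro cores cor_alvo _
  unfold Spec_contar_ciclos contar_ciclos contar_ciclos_alt
  have h1 : (fun (s : Int × Option Int) cor =>
      if cor = 0 then s
      else ((if cor = cor_alvo ∧ s.2 ≠ some cor_alvo then s.1 + 1 else s.1), some cor))
      = pvStep cor_alvo := rfl
  rw [h1, pvStep_zero_skip]
  set f := cores.filter (fun c => c != 0) with hf
  have hnz : ∀ x ∈ f, ¬ x = 0 := by
    intro x hx; have := List.of_mem_filter hx; simpa using this
  rw [pvFoldl_count_adj cor_alvo f hnz 0 none]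
  cases f with
  | nil => simp [pvAdj]
  | cons x xs =>
    have : pvAdj cor_alvo none (x :: xs) = pvAdj cor_alvo (some x) xs := by
      simp [pvAdj]
    rw [this, pvAdj_eq_zip cor_alvo xs x]
    simp
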